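-- pv_equiv track=rewrite | github.com/ccrossmock13/turf-ai | turf_intelligence.py | get_turfgrass_zone
-- ===== SOURCE A (Python) =====
-- TURFGRASS_ZONES = {
--     'cool_season': ['maine', 'new hampshire', 'vermont', 'massachusetts', 'rhode island',
--                     'connecticut', 'new york', 'new jersey', 'pennsylvania', 'ohio',
--                     'michigan', 'indiana', 'illinois', 'wisconsin', 'minnesota',
--                     'iowa', 'north dakota', 'south dakota', 'nebraska', 'montana',
--                     'wyoming', 'colorado', 'idaho', 'washington', 'oregon', 'alaska'],
--     'transition': ['maryland', 'delaware', 'virginia', 'west virginia', 'kentucky',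
--                    'tennessee', 'north carolina', 'missouri', 'kansas', 'oklahoma',
--                    'arkansas', 'new mexico'],
--     'warm_season': ['south carolina', 'georgia', 'florida', 'alabama', 'mississippi',
--                     'louisiana', 'texas', 'arizona', 'california', 'nevada', 'hawaii', 'utah'],
-- }
--
-- def get_turfgrass_zone(state):
--     """Determine turfgrass zone from state name.
--
--     Args:
--         state: State name (lowercase)
--
--     Returns:
--         'cool_season', 'transition', or 'warm_season'
--     """
--     if not state:
--         return None
--     state_lower = state.lower()
--     for zone, states in TURFGRASS_ZONES.items():
--         if state_lower in states:
--             return zone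
--     return None
-- ===== SOURCE B (Python) =====
-- # Flat reverse-lookup table (state -> zone), written out once; replaces the
-- # per-zone scan by a single dict lookup.
-- STATE_TO_ZONE = {
--     'maine': 'cool_season', 'new hampshire': 'cool_season', 'vermont': 'cool_season',
--     'massachusetts': 'cool_season', 'rhode island': 'cool_season', 'connecticut': 'cool_season',
--     'new york': 'cool_season', 'new jersey': 'cool_season', 'pennsylvania': 'cool_season',
--     'ohio': 'cool_season', 'michigan': 'cool_season', 'indiana': 'cool_season',
--     'illinois': 'cool_season', 'wisconsin': 'cool_season', 'minnesota': 'cool_season',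
--     'iowa': 'cool_season', 'north dakota': 'cool_season', 'south dakota': 'cool_season',
--     'nebraska': 'cool_season', 'montana': 'cool_season', 'wyoming': 'cool_season',
--     'colorado': 'cool_season', 'idaho': 'cool_season', 'washington': 'cool_season',
--     'oregon': 'cool_season', 'alaska': 'cool_season',
--     'maryland': 'transition', 'delaware': 'transition', 'virginia': 'transition',
--     'west virginia': 'transition', 'kentucky': 'transition', 'tennessee': 'transition',
--     'north carolina': 'transition', 'missouri': 'transition', 'kansas': 'transition',
--     'oklahoma': 'transition', 'arkansas': 'transition', 'new mexico': 'transition',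
--     'south carolina': 'warm_season', 'georgia': 'warm_season', 'florida': 'warm_season',
--     'alabama': 'warm_season', 'mississippi': 'warm_season', 'louisiana': 'warm_season',
--     'texas': 'warm_season', 'arizona': 'warm_season', 'california': 'warm_season',
--     'nevada': 'warm_season', 'hawaii': 'warm_season', 'utah': 'warm_season',
-- }
--
--
-- def get_turfgrass_zone(state):
--     if not state:
--         return None
--     return STATE_TO_ZONE.get(state.lower())
-- ===== Notes on version B (the rewrite author's own statement) =====
-- stated objective: simpler
-- what changed: Replaces the per-zone scan with list membership tests by a flat precomputed reverse-lookup table (state -> zone) written out once at module level, so the function body is a single dict.get after the falsy guard.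
import Mathlib
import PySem

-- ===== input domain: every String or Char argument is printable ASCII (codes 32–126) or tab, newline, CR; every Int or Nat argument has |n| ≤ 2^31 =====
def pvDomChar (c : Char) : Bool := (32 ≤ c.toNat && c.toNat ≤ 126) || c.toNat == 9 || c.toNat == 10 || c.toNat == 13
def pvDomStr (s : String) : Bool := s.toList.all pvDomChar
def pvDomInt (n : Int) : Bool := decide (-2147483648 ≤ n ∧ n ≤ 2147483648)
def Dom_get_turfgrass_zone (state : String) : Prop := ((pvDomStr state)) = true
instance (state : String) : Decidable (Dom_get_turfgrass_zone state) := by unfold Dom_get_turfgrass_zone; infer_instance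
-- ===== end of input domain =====

-- B replaces A's per-zone scan by a flat precomputed reverse-lookup table (state -> zone) and a single lookup (objective: simpler).

-- ===== PORT A =====
-- module constant TURFGRASS_ZONES (zone -> list of states; dict literal, association list in insertion order)
def TURFGRASS_ZONES : List (String × List String) :=
  [("cool_season", ["maine", "new hampshire", "vermont", "massachusetts", "rhode island",
                    "connecticut", "new york", "new jersey", "pennsylvania", "ohio",
                    "michigan", "indiana", "illinois", "wisconsin", "minnesota",
                    "iowa", "north dakota", "south dakota", "nebraska", "montana",
                    "wyoming", "colorado", "idaho", "washington", "oregon", "alaska"]),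
   ("transition", ["maryland", "delaware", "virginia", "west virginia", "kentucky",
                   "tennessee", "north carolina", "missouri", "kansas", "oklahoma",
                   "arkansas", "new mexico"]),
   ("warm_season", ["south carolina", "georgia", "florida", "alabama", "mississippi",
                    "louisiana", "texas", "arizona", "california", "nevada", "hawaii", "utah"])]

-- 'for zone, states in TURFGRASS_ZONES.items(): if state_lower in states: return zone'
def zoneLoop : List (String × List String) → String → Option String
  | [], _ => none
  | (zone, states) :: rest, sl => if states.contains sl then some zone else zoneLoop rest sl

def get_turfgrass_zone (state : String) : Option String :=
  if state = "" then none
  else zoneLoop TURFGRASS_ZONES (PySem.Str.lower state)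

-- ===== PORT B =====
-- module constant STATE_TO_ZONE (flat dict literal: state -> zone)
def STATE_TO_ZONE : PySem.Dict String String :=
  PySem.Dict.ofList
  [("maine", "cool_season"), ("new hampshire", "cool_season"), ("vermont", "cool_season"),
   ("massachusetts", "cool_season"), ("rhode island", "cool_season"), ("connecticut", "cool_season"),
   ("new york", "cool_season"), ("new jersey", "cool_season"), ("pennsylvania", "cool_season"),
   ("ohio", "cool_season"), ("michigan", "cool_season"), ("indiana", "cool_season"),
   ("illinois", "cool_season"), ("wisconsin", "cool_season"), ("minnesota", "cool_season"),
   ("iowa", "cool_season"), ("north dakota", "cool_season"), ("south dakota", "cool_season"),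
   ("nebraska", "cool_season"), ("montana", "cool_season"), ("wyoming", "cool_season"),
   ("colorado", "cool_season"), ("idaho", "cool_season"), ("washington", "cool_season"),
   ("oregon", "cool_season"), ("alaska", "cool_season"), ("maryland", "transition"),
   ("delaware", "transition"), ("virginia", "transition"), ("west virginia", "transition"),
   ("kentucky", "transition"), ("tennessee", "transition"), ("north carolina", "transition"),
   ("missouri", "transition"), ("kansas", "transition"), ("oklahoma", "transition"),
   ("arkansas", "transition"), ("new mexico", "transition"), ("south carolina", "warm_season"),
   ("georgia", "warm_season"), ("florida", "warm_season"), ("alabama", "warm_season"),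
   ("mississippi", "warm_season"), ("louisiana", "warm_season"), ("texas", "warm_season"),
   ("arizona", "warm_season"), ("california", "warm_season"), ("nevada", "warm_season"),
   ("hawaii", "warm_season"), ("utah", "warm_season")]

def get_turfgrass_zone_alt (state : String) : Option String :=
  if state = "" then none
  else STATE_TO_ZONE.get? (PySem.Str.lower state)

-- ===== PRECONDITION & SPEC =====
def Spec_get_turfgrass_zone (state : String) (out : Option String) : Prop := out = get_turfgrass_zone_alt state
instance (state : String) (out : Option String) : Decidable (Spec_get_turfgrass_zone state out) := by unfold Spec_get_turfgrass_zone; infer_instance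

-- ===== CLAIM (what is proved, stated in full; the proofs are below) =====
def Claim_equal_get_turfgrass_zone : Prop := ∀ (state : String), Dom_get_turfgrass_zone state → Spec_get_turfgrass_zone state (get_turfgrass_zone state)

-- ===== LEMMAS AND PROOFS =====

-- lookup in a flat block of pairs all carrying zone z = membership test in that zone's list
theorem get?_mk_block (l : List String) (z : String) (rest : List (String × String)) (sl : String) :
    (PySem.Dict.mk (l.map (fun st => (st, z)) ++ rest)).get? sl
      = if l.contains sl then some z else (PySem.Dict.mk rest).get? sl := by
  induction l with
  | nil => simp
  | cons a l ih =>
      simp only [List.map_cons, List.cons_append, PySem.Dict.get?_mk_cons, ih, List.contains_cons]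
      by_cases h : a = sl
      · simp [h]
      · simp [h, Ne.symm h]

-- A's zone loop = assoc-list lookup in the flattened (state, zone) pairs
theorem zoneLoop_eq_flat (zones : List (String × List String)) (sl : String) :
    zoneLoop zones sl
      = (PySem.Dict.mk (zones.flatMap (fun zs => zs.2.map (fun st => (st, zs.1))))).get? sl := by
  induction zones with
  | nil => simp [zoneLoop, PySem.Dict.get?]
  | cons p rest ih =>
      obtain ⟨z, l⟩ := p
      simp only [List.flatMap_cons, zoneLoop, get?_mk_block, ih]

set_option maxRecDepth 4096 in
theorem core_eq (sl : String) : zoneLoop TURFGRASS_ZONES sl = STATE_TO_ZONE.get? sl := by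
  rw [zoneLoop_eq_flat]
  have h : STATE_TO_ZONE
      = PySem.Dict.mk (TURFGRASS_ZONES.flatMap (fun zs => zs.2.map (fun st => (st, zs.1)))) := by
    decide
  rw [h]

-- ===== VERDICT (by name: the statement is the Claim_ definition above) =====
theorem get_turfgrass_zone_spec : Claim_equal_get_turfgrass_zone := by
  intro state _
  unfold Spec_get_turfgrass_zone get_turfgrass_zone get_turfgrass_zone_alt
  by_cases h : state = ""
  · simp [h]
  · simp [h, core_eq]
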